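-- pv_equiv track=rewrite | github.com/Oliwerivs/Programovani | Python/KUKA_SCRIPT/NOK_COUVANI.py | extract_ptp_blocks
-- ===== SOURCE A (Python) =====
-- def extract_ptp_blocks(src_content, stop_line_pattern):
--     ptp_blocks = []
--     lines = src_content.splitlines()
--     block = []
--     inside_block = False
--     stop_index = None
--
--     for idx, line in enumerate(lines):
--         if stop_line_pattern in line:
--             stop_index = idx
--             break
--
--     for idx, line in enumerate(lines[:stop_index]):
--         if line.strip().startswith(";FOLD PTP"):
--             block = [line]
--             inside_block = True
--         elif inside_block:
--             block.append(line)
--             if line.strip() == ";ENDFOLD":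
--                 ptp_blocks.append("\n".join(block))
--                 inside_block = False
--
--     return ptp_blocks, stop_index
-- ===== SOURCE B (Python) =====
-- def extract_ptp_blocks(src_content, stop_line_pattern):
--     lines = src_content.splitlines()
--     ptp_blocks = []
--     start = None          # index of the most recent ";FOLD PTP" line of an open block
--     stop_index = None
--     for i, line in enumerate(lines):
--         if stop_line_pattern in line:
--             stop_index = i
--             break
--         s = line.strip()
--         if s.startswith(";FOLD PTP"):
--             start = i
--         elif start is not None and s == ";ENDFOLD":
--             ptp_blocks.append("\n".join(lines[start:i + 1]))
--             start = None
--     return ptp_blocks, stop_index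
-- ===== Notes on version B (the rewrite author's own statement) =====
-- stated objective: simpler
-- what changed: B replaces A's two passes (first scan for the stop line, then a second scan over a slice with an accumulated block list) by a single pass that breaks at the stop line and, instead of accumulating block contents, records only the start index of an open block and slices lines[start:i+1] at the closing ;ENDFOLD.
import Mathlib
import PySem

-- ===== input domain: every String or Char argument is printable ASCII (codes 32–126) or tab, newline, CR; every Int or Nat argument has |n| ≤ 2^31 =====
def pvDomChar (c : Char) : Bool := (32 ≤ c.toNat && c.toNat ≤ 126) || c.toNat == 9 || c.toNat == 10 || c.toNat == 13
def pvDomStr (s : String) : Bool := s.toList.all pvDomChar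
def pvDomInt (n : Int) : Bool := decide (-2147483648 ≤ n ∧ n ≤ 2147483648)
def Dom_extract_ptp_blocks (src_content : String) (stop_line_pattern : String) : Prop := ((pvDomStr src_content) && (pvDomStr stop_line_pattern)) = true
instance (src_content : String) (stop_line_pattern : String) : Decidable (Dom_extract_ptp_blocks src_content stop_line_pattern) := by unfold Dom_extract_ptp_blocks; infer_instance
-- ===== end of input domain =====

-- B replaces A's two passes by a single pass that breaks at the stop line and records
-- only the start index of an open block, slicing the lines at the closing ";ENDFOLD"
-- instead of accumulating block contents line by line (objective: simpler).

-- ===== PORT A =====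
-- first loop of A: find the index of the first line containing the pattern (break)
def pvFindStopA (pat : String) : List (Int × String) → Option Int
  | [] => none
  | (idx, line) :: rest =>
    if PySem.Str.isIn pat line then some idx else pvFindStopA pat rest

-- body of A's second loop (the index of enumerate is unused by the body)
def pvStepA (st : List String × List String × Bool) (p : Int × String) :
    List String × List String × Bool :=
  let line := p.2
  if PySem.Str.startswith (PySem.Str.strip line) ";FOLD PTP" then
    (st.1, [line], true)
  else if st.2.2 then
    let block := st.2.1 ++ [line]
    if PySem.Str.strip line == ";ENDFOLD" then
      (st.1 ++ [PySem.Str.join "\n" block], block, false)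
    else
      (st.1, block, st.2.2)
  else
    st

def extract_ptp_blocks (src_content : String) (stop_line_pattern : String) : List String × Option Int :=
  let lines := PySem.Str.splitlines src_content
  let stop_index := pvFindStopA stop_line_pattern (PySem.List.enumerate lines 0)
  let st := List.foldl pvStepA ([], [], false)
      (PySem.List.enumerate (PySem.List.slice lines none stop_index) 0)
  (st.1, stop_index)

-- ===== PORT B =====
-- B's single loop: break at the stop line; otherwise track the start index of an
-- open block and slice lines[start:i+1] at its closing ";ENDFOLD"
def pvLoopB (lines : List String) (pat : String) :
    List (Int × String) → List String → Option Int → List String × Option Int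
  | [], acc, _ => (acc, none)
  | (i, line) :: rest, acc, start =>
    if PySem.Str.isIn pat line then (acc, some i)
    else
      let s := PySem.Str.strip line
      if PySem.Str.startswith s ";FOLD PTP" then
        pvLoopB lines pat rest acc (some i)
      else if start.isSome && (s == ";ENDFOLD") then
        pvLoopB lines pat rest
          (acc ++ [PySem.Str.join "\n" (PySem.List.slice lines start (some (i + 1)))]) none
      else
        pvLoopB lines pat rest acc start

def extract_ptp_blocks_alt (src_content : String) (stop_line_pattern : String) : List String × Option Int :=
  let lines := PySem.Str.splitlines src_content
  pvLoopB lines stop_line_pattern (PySem.List.enumerate lines 0) [] none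

-- ===== PRECONDITION & SPEC =====
def Spec_extract_ptp_blocks (src_content : String) (stop_line_pattern : String) (out : List String × Option Int) : Prop := out = extract_ptp_blocks_alt src_content stop_line_pattern
instance (src_content : String) (stop_line_pattern : String) (out : List String × Option Int) : Decidable (Spec_extract_ptp_blocks src_content stop_line_pattern out) := by unfold Spec_extract_ptp_blocks; infer_instance

-- ===== CLAIM (what is proved, stated in full; the proofs are below) =====
def Claim_equal_extract_ptp_blocks : Prop := ∀ (src_content : String) (stop_line_pattern : String), Dom_extract_ptp_blocks src_content stop_line_pattern → Spec_extract_ptp_blocks src_content stop_line_pattern (extract_ptp_blocks src_content stop_line_pattern)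

-- ===== LEMMAS AND PROOFS =====

set_option maxHeartbeats 1000000

-- A's step, with the (unused) enumerate index dropped
def pvStepA' (st : List String × List String × Bool) (l : String) :
    List String × List String × Bool := pvStepA st (0, l)

-- the stop index in closed form
def pvStopOf (pat : String) (xs : List String) (s : Int) : Option Int :=
  if xs.dropWhile (fun l => !(PySem.Str.isIn pat l)) = [] then none
  else some (s + ((xs.takeWhile (fun l => !(PySem.Str.isIn pat l))).length : Int))

lemma pvFindStopA_cons (pat : String) (s : Int) (x : String) (rest : List (Int × String)) :
    pvFindStopA pat ((s, x) :: rest)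
      = if PySem.Str.isIn pat x then some s else pvFindStopA pat rest := rfl

lemma pvFindStopA_eq (pat : String) (xs : List String) (s : Int) :
    pvFindStopA pat (PySem.List.enumerate xs s) = pvStopOf pat xs s := by
  induction xs generalizing s with
  | nil => simp [pvFindStopA, pvStopOf]
  | cons x xs ih =>
    rw [PySem.List.enumerate_cons, pvFindStopA_cons]
    cases h : PySem.Str.isIn pat x with
    | true =>
      simp only [↓reduceIte]
      unfold pvStopOf
      rw [List.dropWhile_cons, List.takeWhile_cons]
      simp only [h, Bool.not_true, Bool.false_eq_true, ↓reduceIte]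
      rw [if_neg (List.cons_ne_nil _ _)]
      simp
    | false =>
      simp only [Bool.false_eq_true, ↓reduceIte, ih]
      unfold pvStopOf
      rw [List.dropWhile_cons, List.takeWhile_cons]
      simp only [h, Bool.not_false, ↓reduceIte, List.length_cons]
      split_ifs with hd
      · rfl
      · simp only [Option.some.injEq]; push_cast; ring

lemma pvFoldA_enum (xs : List String) (s : Int) (st : List String × List String × Bool) :
    List.foldl pvStepA st (PySem.List.enumerate xs s) = List.foldl pvStepA' st xs := by
  induction xs generalizing s st with
  | nil => rfl
  | cons x xs ih =>
    rw [PySem.List.enumerate_cons, List.foldl_cons, List.foldl_cons]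
    exact ih _ _

lemma pvTake_takeWhile {α : Type} (p : α → Bool) (xs : List α) :
    xs.take ((xs.takeWhile p).length) = xs.takeWhile p := by
  induction xs with
  | nil => rfl
  | cons x xs ih =>
    by_cases h : p x
    · simp [List.takeWhile, h, ih]
    · simp [List.takeWhile, h]

-- invariant tying A's loop state to B's (accumulator, open-block start index)
def pvInv (lines : List String) (i : Nat) (stA : List String × List String × Bool)
    (acc : List String) (start : Option Int) : Prop :=
  stA.1 = acc ∧
  (match start with
   | none => stA.2.2 = false
   | some f => ∃ fn : Nat, f = (fn : Int) ∧ fn < i ∧ stA.2.2 = true ∧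
       stA.2.1 = (lines.drop fn).take (i - fn))

lemma pvBlock_snoc (lines : List String) (fn i : Nat) (l : String) (rest : List String)
    (hfn : fn < i + 1) (hdrop : lines.drop i = l :: rest) :
    (lines.drop fn).take (i - fn) ++ [l] = (lines.drop fn).take (i + 1 - fn) := by
  have hget : (lines.drop fn)[i - fn]? = some l := by
    rw [List.getElem?_drop]
    have h1 : fn + (i - fn) = i := by omega
    rw [h1]
    have h2 : lines[i]? = (lines.drop i)[0]? := by rw [List.getElem?_drop, Nat.add_zero]
    rw [h2, hdrop]; rfl
  have h3 : i + 1 - fn = (i - fn) + 1 := by omega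
  rw [h3, List.take_add_one, hget]
  rfl

lemma pvMain (pat : String) (lines : List String) (suf : List String) :
    ∀ (i : Nat), lines.drop i = suf →
    ∀ stA acc start, pvInv lines i stA acc start →
    pvLoopB lines pat (PySem.List.enumerate suf (i : Int)) acc start
      = ((List.foldl pvStepA' stA (suf.takeWhile (fun l => !(PySem.Str.isIn pat l)))).1,
         pvStopOf pat suf (i : Int)) := by
  induction suf with
  | nil =>
    intro i _ stA acc start hinv
    simp [pvLoopB, pvStopOf, hinv.1]
  | cons l rest ih =>
    intro i hdrop stA acc start hinv
    unfold pvInv at hinv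
    obtain ⟨hacc, hst⟩ := hinv
    have hrest : lines.drop (i + 1) = rest := by
      have h0 : lines.drop (i + 1) = (lines.drop i).drop 1 := by rw [List.drop_drop]
      rw [h0, hdrop]; rfl
    have hcast : (i : Int) + 1 = ((i + 1 : Nat) : Int) := by push_cast; ring
    rw [PySem.List.enumerate_cons]
    show (if PySem.Str.isIn pat l then (acc, some (i : Int))
      else
        if PySem.Str.startswith (PySem.Str.strip l) ";FOLD PTP" then
          pvLoopB lines pat (PySem.List.enumerate rest ((i : Int) + 1)) acc (some (i : Int))
        else if start.isSome && (PySem.Str.strip l == ";ENDFOLD") then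
          pvLoopB lines pat (PySem.List.enumerate rest ((i : Int) + 1))
            (acc ++ [PySem.Str.join "\n" (PySem.List.slice lines start (some ((i : Int) + 1)))]) none
        else pvLoopB lines pat (PySem.List.enumerate rest ((i : Int) + 1)) acc start) = _
    cases hP : PySem.Str.isIn pat l with
    | true =>
      simp only [↓reduceIte]
      rw [List.takeWhile_cons]
      unfold pvStopOf
      rw [List.dropWhile_cons]
      simp only [hP, Bool.not_true, Bool.false_eq_true, ↓reduceIte, List.foldl_nil]
      rw [if_neg (List.cons_ne_nil _ _)]
      have hP' : PySem.Chars.isIn pat.toList l.toList = true := by simpa using hP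
      simp [hacc, hP']
    | false =>
      have htw : (l :: rest).takeWhile (fun l => !(PySem.Str.isIn pat l))
          = l :: rest.takeWhile (fun l => !(PySem.Str.isIn pat l)) := by
        rw [List.takeWhile_cons]
        simp only [hP, Bool.not_false, ↓reduceIte]
      have hstop : pvStopOf pat (l :: rest) (i : Int)
          = pvStopOf pat rest ((i + 1 : Nat) : Int) := by
        unfold pvStopOf
        rw [List.dropWhile_cons, List.takeWhile_cons]
        simp only [hP, Bool.not_false, ↓reduceIte, List.length_cons]
        split_ifs with hd
        · rfl
        · simp only [Option.some.injEq]; push_cast; ring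
      rw [htw, hstop, List.foldl_cons]
      cases hF : PySem.Str.startswith (PySem.Str.strip l) ";FOLD PTP" with
      | true =>
        have hstep : pvStepA' stA l = (stA.1, [l], true) := by
          unfold pvStepA' pvStepA
          simp only [hF, ↓reduceIte]
        rw [hstep]
        simp only [Bool.false_eq_true, ↓reduceIte, hcast]
        refine ih (i + 1) hrest _ acc (some (i : Int)) ?_
        unfold pvInv
        refine ⟨hacc, i, rfl, by omega, rfl, ?_⟩
        rw [hdrop]
        have h1 : i + 1 - i = 1 := by omega
        rw [h1]; rfl
      | false =>
        cases hstart : start with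
        | none =>
          have hin : stA.2.2 = false := by rw [hstart] at hst; exact hst
          have hstep : pvStepA' stA l = stA := by
            unfold pvStepA' pvStepA
            simp only [hF, hin, Bool.false_eq_true, ↓reduceIte]
          rw [hstep]
          simp only [Bool.false_eq_true, ↓reduceIte, Option.isSome_none, Bool.false_and, hcast]
          refine ih (i + 1) hrest stA acc none ?_
          unfold pvInv
          exact ⟨hacc, hin⟩
        | some f =>
          rw [hstart] at hst
          obtain ⟨fn, hf, hfn, hin, hblk⟩ := hst
          have hsnoc : stA.2.1 ++ [l] = (lines.drop fn).take (i + 1 - fn) := by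
            rw [hblk]
            exact pvBlock_snoc lines fn i l rest (by omega) hdrop
          cases hE : (PySem.Str.strip l == ";ENDFOLD") with
          | true =>
            have hstep : pvStepA' stA l
                = (stA.1 ++ [PySem.Str.join "\n" (stA.2.1 ++ [l])], stA.2.1 ++ [l], false) := by
              unfold pvStepA' pvStepA
              simp only [hF, hin, hE, Bool.false_eq_true, ↓reduceIte]
            rw [hstep]
            simp only [Bool.false_eq_true, ↓reduceIte, Option.isSome_some, Bool.true_and, hcast]
            have hsl : PySem.List.slice lines (some f) (some ((i + 1 : Nat) : Int))
                = stA.2.1 ++ [l] := by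
              rw [hf, PySem.List.slice_natCast, hsnoc]
            rw [hsl]
            refine ih (i + 1) hrest _ _ none ?_
            unfold pvInv
            exact ⟨by rw [hacc], rfl⟩
          | false =>
            have hstep : pvStepA' stA l = (stA.1, stA.2.1 ++ [l], true) := by
              unfold pvStepA' pvStepA
              simp only [hF, hin, hE, Bool.false_eq_true, ↓reduceIte]
            rw [hstep]
            simp only [Bool.false_eq_true, ↓reduceIte, Option.isSome_some, Bool.true_and, hcast]
            refine ih (i + 1) hrest _ acc (some f) ?_
            unfold pvInv
            exact ⟨hacc, fn, hf, by omega, rfl, hsnoc⟩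

lemma pvSlice_eq_takeWhile (pat : String) (lines : List String) :
    PySem.List.slice lines none (pvStopOf pat lines 0)
      = lines.takeWhile (fun l => !(PySem.Str.isIn pat l)) := by
  unfold pvStopOf
  split_ifs with hd
  · rw [PySem.List.slice_none_none]
    exact (List.takeWhile_eq_self_iff.mpr (List.dropWhile_eq_nil_iff.mp hd)).symm
  · have h0 : (0 : Int) + ((lines.takeWhile (fun l => !(PySem.Str.isIn pat l))).length : Int)
        = ((lines.takeWhile (fun l => !(PySem.Str.isIn pat l))).length : Int) := by ring
    rw [h0, PySem.List.slice_to_natCast]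
    exact pvTake_takeWhile _ _

-- ===== VERDICT (by name: the statement is the Claim_ definition above) =====
theorem extract_ptp_blocks_spec : Claim_equal_extract_ptp_blocks := by
  intro src_content stop_line_pattern _
  show extract_ptp_blocks src_content stop_line_pattern
      = extract_ptp_blocks_alt src_content stop_line_pattern
  simp only [extract_ptp_blocks, extract_ptp_blocks_alt]
  have key := pvMain stop_line_pattern (PySem.Str.splitlines src_content)
    (PySem.Str.splitlines src_content) 0 rfl ([], [], false) [] none
    (by unfold pvInv; exact ⟨rfl, rfl⟩)
  simp only [Nat.cast_zero] at key
  rw [key, pvFindStopA_eq, pvSlice_eq_takeWhile, pvFoldA_enum]
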